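-- pv_equiv track=rewrite | github.com/GabrielOWO799/personal-assistant | scripts/ai_chaowan_search.py | filter_by_source
-- ===== SOURCE A (Python) =====
-- def filter_by_source(results):
--     """按来源优先级筛选"""
--     priority_sources = {
--         'high': ['kickstarter.com', 'indiegogo.com', '36kr.com', 'itjuzi.com'],
--         'medium': ['sina.com.cn', 'qq.com', 'sohu.com', '163.com', 'ifeng.com'],
--         'low': ['zhihu.com', 'csdn.net', 'github.com']
--     }
--
--     filtered = {'high': [], 'medium': [], 'low': []}
--
--     for result in results:
--         url = result.get('url', '')
--         for level, domains in priority_sources.items():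
--             if any(domain in url for domain in domains):
--                 filtered[level].append(result)
--                 break
--         else:
--             filtered['low'].append(result)
--
--     return filtered['high'] + filtered['medium'] + filtered['low']
-- ===== SOURCE B (Python) =====
-- _PRIORITY = [
--     ['kickstarter.com', 'indiegogo.com', '36kr.com', 'itjuzi.com'],
--     ['sina.com.cn', 'qq.com', 'sohu.com', '163.com', 'ifeng.com'],
--     ['zhihu.com', 'csdn.net', 'github.com'],
-- ]
--
--
-- def _rank(result):
--     url = result.get('url', '')
--     for rank, domains in enumerate(_PRIORITY):
--         if any(domain in url for domain in domains):
--             return rank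
--     return 2
--
--
-- def filter_by_source(results):
--     return sorted(results, key=_rank)
-- ===== Notes on version B (the rewrite author's own statement) =====
-- stated objective: simpler
-- what changed: Replaces the one-pass dict-of-buckets loop with inner break/else by a per-result priority rank helper plus a single stable sorted() call; stability makes equal-rank results keep their original order, reproducing the bucket concatenation.
import Mathlib
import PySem

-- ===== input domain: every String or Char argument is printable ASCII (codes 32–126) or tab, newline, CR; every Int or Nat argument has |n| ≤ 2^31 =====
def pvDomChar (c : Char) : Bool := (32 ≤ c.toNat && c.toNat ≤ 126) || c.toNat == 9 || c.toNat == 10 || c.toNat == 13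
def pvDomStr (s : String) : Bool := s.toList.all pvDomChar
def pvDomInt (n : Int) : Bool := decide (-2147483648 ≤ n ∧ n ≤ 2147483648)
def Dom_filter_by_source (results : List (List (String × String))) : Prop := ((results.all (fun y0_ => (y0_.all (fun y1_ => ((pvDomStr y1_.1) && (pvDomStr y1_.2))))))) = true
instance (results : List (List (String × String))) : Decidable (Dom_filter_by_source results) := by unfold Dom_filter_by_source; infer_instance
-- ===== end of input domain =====

-- B replaces A's one-pass dict-of-buckets loop by a priority-rank helper and one stable sort (objective: simpler).

-- ===== PORT A =====
def pvPrioritySources : PySem.Dict String (List String) :=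
  PySem.Dict.ofList
    [("high", ["kickstarter.com", "indiegogo.com", "36kr.com", "itjuzi.com"]),
     ("medium", ["sina.com.cn", "qq.com", "sohu.com", "163.com", "ifeng.com"]),
     ("low", ["zhihu.com", "csdn.net", "github.com"])]

-- the inner 'for level, domains … break / else' loop of A
def pvLevelLoop (url : String) : List (String × List String) → Option String
  | [] => none
  | (level, domains) :: rest =>
      if domains.any (fun domain => PySem.Str.isIn domain url) then some level
      else pvLevelLoop url rest

def filter_by_source (results : List (List (String × String))) : List (List (String × String)) :=
  let filtered : PySem.Dict String (List (List (String × String))) :=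
    PySem.Dict.ofList [("high", []), ("medium", []), ("low", [])]
  let filtered := results.foldl (fun f result =>
    let url := PySem.Dict.getD (PySem.Dict.mk result) "url" ""
    match pvLevelLoop url pvPrioritySources.items with
    | some level => f.insert level (f.getD level [] ++ [result])
    | none => f.insert "low" (f.getD "low" [] ++ [result])) filtered
  filtered.getD "high" [] ++ filtered.getD "medium" [] ++ filtered.getD "low" []

-- ===== PORT B =====
def pvPriority : List (List String) :=
  [["kickstarter.com", "indiegogo.com", "36kr.com", "itjuzi.com"],
   ["sina.com.cn", "qq.com", "sohu.com", "163.com", "ifeng.com"],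
   ["zhihu.com", "csdn.net", "github.com"]]

-- the 'for rank, domains in enumerate(_PRIORITY)' loop of _rank
def pvRankLoop (url : String) : List (Int × List String) → Int
  | [] => 2
  | (rank, domains) :: rest =>
      if domains.any (fun domain => PySem.Str.isIn domain url) then rank
      else pvRankLoop url rest

def pvRank (result : List (String × String)) : Int :=
  pvRankLoop (PySem.Dict.getD (PySem.Dict.mk result) "url" "") (PySem.List.enumerate pvPriority)

def filter_by_source_alt (results : List (List (String × String))) : List (List (String × String)) :=
  PySem.List.sorted results pvRank false

-- ===== PRECONDITION & SPEC =====
def Spec_filter_by_source (results : List (List (String × String))) (out : List (List (String × String))) : Prop := out = filter_by_source_alt results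
instance (results : List (List (String × String))) (out : List (List (String × String))) : Decidable (Spec_filter_by_source results out) := by unfold Spec_filter_by_source; infer_instance

-- ===== CLAIM (what is proved, stated in full; the proofs are below) =====
def Claim_equal_filter_by_source : Prop := ∀ (results : List (List (String × String))), Dom_filter_by_source results → Spec_filter_by_source results (filter_by_source results)

-- ===== LEMMAS AND PROOFS =====

-- the bucket of results of rank r
def pvF (r : Int) (xs : List (List (String × String))) : List (List (String × String)) :=
  xs.filter (fun x => pvRank x == r)

theorem pvF_append (r : Int) (xs ys : List (List (String × String))) :
    pvF r (xs ++ ys) = pvF r xs ++ pvF r ys := by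
  simp [pvF]

theorem pvRank_mem_F {r : Int} {x : List (String × String)}
    {xs : List (List (String × String))} (h : x ∈ pvF r xs) : pvRank x = r := by
  simp [pvF, List.mem_filter] at h
  exact h.2

theorem pvRank_eq (x : List (String × String)) :
    pvRank x =
      (if ["kickstarter.com", "indiegogo.com", "36kr.com", "itjuzi.com"].any
            (fun domain => PySem.Str.isIn domain (PySem.Dict.getD (PySem.Dict.mk x) "url" "")) then 0
       else if ["sina.com.cn", "qq.com", "sohu.com", "163.com", "ifeng.com"].any
            (fun domain => PySem.Str.isIn domain (PySem.Dict.getD (PySem.Dict.mk x) "url" "")) then 1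
       else 2) := by
  have henum : PySem.List.enumerate pvPriority =
      [(0, ["kickstarter.com", "indiegogo.com", "36kr.com", "itjuzi.com"]),
       (1, ["sina.com.cn", "qq.com", "sohu.com", "163.com", "ifeng.com"]),
       (2, ["zhihu.com", "csdn.net", "github.com"])] := by decide
  simp only [pvRank, henum, pvRankLoop]
  split_ifs <;> rfl

theorem pvRank_cases (x : List (String × String)) :
    pvRank x = 0 ∨ pvRank x = 1 ∨ pvRank x = 2 := by
  rw [pvRank_eq]; split_ifs <;> simp

theorem insertBy_all_before {α : Type} (before : α → α → Bool) (x : α) (l : List α)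
    (h : ∀ y ∈ l, before x y = true) : PySem.List.insertBy before x l = x :: l := by
  cases l with
  | nil => rfl
  | cons y ys => simp [PySem.List.insertBy, h y (by simp)]

theorem insertBy_append_not_before {α : Type} (before : α → α → Bool) (x : α) (l1 l2 : List α)
    (h : ∀ y ∈ l1, before x y = false) :
    PySem.List.insertBy before x (l1 ++ l2) = l1 ++ PySem.List.insertBy before x l2 := by
  induction l1 with
  | nil => rfl
  | cons y ys ih =>
      simp only [List.cons_append, PySem.List.insertBy, h y (by simp)]
      simp only [Bool.false_eq_true, if_false]
      rw [ih (fun z hz => h z (by simp [hz]))]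

theorem alt_eq_buckets (xs : List (List (String × String))) :
    filter_by_source_alt xs = pvF 0 xs ++ pvF 1 xs ++ pvF 2 xs := by
  unfold filter_by_source_alt
  rw [PySem.List.sorted_eq_foldl_insertBy]
  induction xs using List.reverseRecOn with
  | nil => rfl
  | append_singleton xs x ih =>
      rw [List.foldl_append, List.foldl_cons, List.foldl_nil, ih, List.append_assoc]
      rcases pvRank_cases x with h0 | h1 | h2
      · rw [insertBy_append_not_before _ _ _ _
              (fun y hy => by simp [pvRank_mem_F hy, h0]),
            insertBy_all_before _ _ _
              (fun y hy => by
                rcases List.mem_append.mp hy with hm | hm <;>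
                  simp [pvRank_mem_F hm, h0]),
            pvF_append, pvF_append, pvF_append]
        have e0 : pvF 0 [x] = [x] := by simp [pvF, h0]
        have e1 : pvF 1 [x] = [] := by simp [pvF, h0]
        have e2 : pvF 2 [x] = [] := by simp [pvF, h0]
        simp [e0, e1, e2]
      · rw [insertBy_append_not_before _ _ _ _
              (fun y hy => by simp [pvRank_mem_F hy, h1]),
            insertBy_append_not_before _ _ _ _
              (fun y hy => by simp [pvRank_mem_F hy, h1]),
            insertBy_all_before _ _ _
              (fun y hy => by simp [pvRank_mem_F hy, h1]),
            pvF_append, pvF_append, pvF_append]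
        have e0 : pvF 0 [x] = [] := by simp [pvF, h1]
        have e1 : pvF 1 [x] = [x] := by simp [pvF, h1]
        have e2 : pvF 2 [x] = [] := by simp [pvF, h1]
        simp [e0, e1, e2]
      · rw [insertBy_append_not_before _ _ _ _
              (fun y hy => by simp [pvRank_mem_F hy, h2]),
            insertBy_append_not_before _ _ _ _
              (fun y hy => by simp [pvRank_mem_F hy, h2]),
            PySem.List.insertBy_of_forall_not_before _ _ _
              (fun y hy => by simp [pvRank_mem_F hy, h2]),
            pvF_append, pvF_append, pvF_append]
        have e0 : pvF 0 [x] = [] := by simp [pvF, h2]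
        have e1 : pvF 1 [x] = [] := by simp [pvF, h2]
        have e2 : pvF 2 [x] = [x] := by simp [pvF, h2]
        simp [e0, e1, e2]

theorem pvItems_eq : pvPrioritySources.items =
    [("high", ["kickstarter.com", "indiegogo.com", "36kr.com", "itjuzi.com"]),
     ("medium", ["sina.com.cn", "qq.com", "sohu.com", "163.com", "ifeng.com"]),
     ("low", ["zhihu.com", "csdn.net", "github.com"])] := by decide

theorem a_loop (xs : List (List (String × String))) :
    ∀ (h m l : List (List (String × String))),
    List.foldl (fun f result =>
      let url := PySem.Dict.getD (PySem.Dict.mk result) "url" ""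
      match pvLevelLoop url pvPrioritySources.items with
      | some level => f.insert level (f.getD level [] ++ [result])
      | none => f.insert "low" (f.getD "low" [] ++ [result]))
      (PySem.Dict.mk [("high", h), ("medium", m), ("low", l)]) xs
    = PySem.Dict.mk [("high", h ++ pvF 0 xs), ("medium", m ++ pvF 1 xs), ("low", l ++ pvF 2 xs)] := by
  induction xs with
  | nil => intro h m l; simp [pvF]
  | cons x rest ih =>
      intro h m l
      by_cases hA : (["kickstarter.com", "indiegogo.com", "36kr.com", "itjuzi.com"].any
          (fun domain => PySem.Str.isIn domain (PySem.Dict.getD (PySem.Dict.mk x) "url" ""))) = true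
      · have hx : pvRank x = 0 := by rw [pvRank_eq, if_pos hA]
        have hlev : pvLevelLoop (PySem.Dict.getD (PySem.Dict.mk x) "url" "")
            pvPrioritySources.items = some "high" := by
          rw [pvItems_eq]; simp only [pvLevelLoop]; rw [if_pos hA]
        have hins : (PySem.Dict.mk [("high", h), ("medium", m), ("low", l)]).insert "high"
            ((PySem.Dict.mk [("high", h), ("medium", m), ("low", l)]).getD "high" [] ++ [x])
            = PySem.Dict.mk [("high", h ++ [x]), ("medium", m), ("low", l)] := rfl
        simp only [List.foldl_cons, hlev]
        rw [hins, ih (h ++ [x]) m l]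
        have e0 : pvF 0 (x :: rest) = x :: pvF 0 rest := by simp [pvF, hx]
        have e1 : pvF 1 (x :: rest) = pvF 1 rest := by simp [pvF, hx]
        have e2 : pvF 2 (x :: rest) = pvF 2 rest := by simp [pvF, hx]
        simp [e0, e1, e2]
      · by_cases hB : (["sina.com.cn", "qq.com", "sohu.com", "163.com", "ifeng.com"].any
            (fun domain => PySem.Str.isIn domain (PySem.Dict.getD (PySem.Dict.mk x) "url" ""))) = true
        · have hx : pvRank x = 1 := by rw [pvRank_eq, if_neg hA, if_pos hB]
          have hlev : pvLevelLoop (PySem.Dict.getD (PySem.Dict.mk x) "url" "")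
              pvPrioritySources.items = some "medium" := by
            rw [pvItems_eq]; simp only [pvLevelLoop]; rw [if_neg hA, if_pos hB]
          have hins : (PySem.Dict.mk [("high", h), ("medium", m), ("low", l)]).insert "medium"
              ((PySem.Dict.mk [("high", h), ("medium", m), ("low", l)]).getD "medium" [] ++ [x])
              = PySem.Dict.mk [("high", h), ("medium", m ++ [x]), ("low", l)] := rfl
          simp only [List.foldl_cons, hlev]
          rw [hins, ih h (m ++ [x]) l]
          have e0 : pvF 0 (x :: rest) = pvF 0 rest := by simp [pvF, hx]
          have e1 : pvF 1 (x :: rest) = x :: pvF 1 rest := by simp [pvF, hx]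
          have e2 : pvF 2 (x :: rest) = pvF 2 rest := by simp [pvF, hx]
          simp [e0, e1, e2]
        · have hx : pvRank x = 2 := by rw [pvRank_eq, if_neg hA, if_neg hB]
          have hins : (PySem.Dict.mk [("high", h), ("medium", m), ("low", l)]).insert "low"
              ((PySem.Dict.mk [("high", h), ("medium", m), ("low", l)]).getD "low" [] ++ [x])
              = PySem.Dict.mk [("high", h), ("medium", m), ("low", l ++ [x])] := rfl
          have e0 : pvF 0 (x :: rest) = pvF 0 rest := by simp [pvF, hx]
          have e1 : pvF 1 (x :: rest) = pvF 1 rest := by simp [pvF, hx]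
          have e2 : pvF 2 (x :: rest) = x :: pvF 2 rest := by simp [pvF, hx]
          by_cases hC : (["zhihu.com", "csdn.net", "github.com"].any
              (fun domain => PySem.Str.isIn domain (PySem.Dict.getD (PySem.Dict.mk x) "url" ""))) = true
          · have hlev : pvLevelLoop (PySem.Dict.getD (PySem.Dict.mk x) "url" "")
                pvPrioritySources.items = some "low" := by
              rw [pvItems_eq]; simp only [pvLevelLoop]; rw [if_neg hA, if_neg hB, if_pos hC]
            simp only [List.foldl_cons, hlev]
            rw [hins, ih h m (l ++ [x])]
            simp [e0, e1, e2]
          · have hlev : pvLevelLoop (PySem.Dict.getD (PySem.Dict.mk x) "url" "")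
                pvPrioritySources.items = none := by
              rw [pvItems_eq]; simp only [pvLevelLoop]; rw [if_neg hA, if_neg hB, if_neg hC]
            simp only [List.foldl_cons, hlev]
            rw [hins, ih h m (l ++ [x])]
            simp [e0, e1, e2]

theorem a_eq_buckets (xs : List (List (String × String))) :
    filter_by_source xs = pvF 0 xs ++ pvF 1 xs ++ pvF 2 xs := by
  have h1 : filter_by_source xs =
      (List.foldl (fun f result =>
        let url := PySem.Dict.getD (PySem.Dict.mk result) "url" ""
        match pvLevelLoop url pvPrioritySources.items with
        | some level => f.insert level (f.getD level [] ++ [result])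
        | none => f.insert "low" (f.getD "low" [] ++ [result]))
        (PySem.Dict.mk [("high", []), ("medium", []), ("low", [])]) xs).getD "high" [] ++
      (List.foldl (fun f result =>
        let url := PySem.Dict.getD (PySem.Dict.mk result) "url" ""
        match pvLevelLoop url pvPrioritySources.items with
        | some level => f.insert level (f.getD level [] ++ [result])
        | none => f.insert "low" (f.getD "low" [] ++ [result]))
        (PySem.Dict.mk [("high", []), ("medium", []), ("low", [])]) xs).getD "medium" [] ++
      (List.foldl (fun f result =>
        let url := PySem.Dict.getD (PySem.Dict.mk result) "url" ""
        match pvLevelLoop url pvPrioritySources.items with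
        | some level => f.insert level (f.getD level [] ++ [result])
        | none => f.insert "low" (f.getD "low" [] ++ [result]))
        (PySem.Dict.mk [("high", []), ("medium", []), ("low", [])]) xs).getD "low" [] := rfl
  rw [h1, a_loop xs [] [] []]
  have g0 : ∀ (h m l : List (List (String × String))),
      (PySem.Dict.mk [("high", h), ("medium", m), ("low", l)]).getD "high" [] = h :=
    fun h m l => rfl
  have g1 : ∀ (h m l : List (List (String × String))),
      (PySem.Dict.mk [("high", h), ("medium", m), ("low", l)]).getD "medium" [] = m :=
    fun h m l => rfl
  have g2 : ∀ (h m l : List (List (String × String))),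
      (PySem.Dict.mk [("high", h), ("medium", m), ("low", l)]).getD "low" [] = l :=
    fun h m l => rfl
  rw [g0, g1, g2]
  simp

-- ===== VERDICT (by name: the statement is the Claim_ definition above) =====
theorem filter_by_source_spec : Claim_equal_filter_by_source := by
  intro results _
  unfold Spec_filter_by_source
  rw [a_eq_buckets, alt_eq_buckets]
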